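-- pv_equiv track=rewrite | github.com/cotyarancibia/automatas-y-gramatica | Trabajo práctico N°2/ejercicio9.py | es_comentario_valido
-- ===== SOURCE A (Python) =====
-- ALFABETO_COMENTARIO = {'/', '*', 'a', 'b'}
--
-- Q0_INICIO = 0
--
-- Q1_DESPUES_SLASH = 1
--
-- Q2_DENTRO_COMENTARIO = 2
--
-- Q3_PUEDE_CERRAR = 3
--
-- Q4_CERRADO = 4
--
-- def es_comentario_valido(cadena: str) -> bool:
--     """Verifica si la cadena es un comentario válido del tipo /* ... */."""
--     if not cadena:
--         return False
--
--     estado = Q0_INICIO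
--
--     for simbolo in cadena:
--         if simbolo not in ALFABETO_COMENTARIO:
--             return False
--
--         if estado == Q0_INICIO:
--             # q0: debemos recibir el primer '/'
--             if simbolo == '/':
--                 estado = Q1_DESPUES_SLASH
--             else:
--                 return False
--
--         elif estado == Q1_DESPUES_SLASH:
--             # q1: después de '/', debemos recibir '*' para iniciar el comentario
--             if simbolo == '*':
--                 estado = Q2_DENTRO_COMENTARIO
--             else:
--                 return False
--
--         elif estado == Q2_DENTRO_COMENTARIO:
--             # q2: dentro del comentario, aceptamos a, b, /, o '*' que puede ser el inicio del cierre
--             if simbolo == '*':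
--                 estado = Q3_PUEDE_CERRAR
--             elif simbolo in {'a', 'b', '/'}:
--                 estado = Q2_DENTRO_COMENTARIO
--             else:
--                 return False
--
--         elif estado == Q3_PUEDE_CERRAR:
--             # q3: ya vimos '*', puede ser el cierre si viene '/'
--             if simbolo == '/':
--                 estado = Q4_CERRADO
--             elif simbolo == '*':
--                 estado = Q3_PUEDE_CERRAR
--             elif simbolo in {'a', 'b', '/'}:
--                 estado = Q2_DENTRO_COMENTARIO
--             else:
--                 return False
--
--         elif estado == Q4_CERRADO:
--             # q4: comentario cerrado, no debe haber símbolos adicionales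
--             return False
--
--     return estado == Q4_CERRADO
-- ===== SOURCE B (Python) =====
-- ALFABETO_COMENTARIO = {'/', '*', 'a', 'b'}
--
--
-- def es_comentario_valido(cadena: str) -> bool:
--     """Verifica si la cadena es un comentario válido del tipo /* ... */."""
--     if not set(cadena) <= ALFABETO_COMENTARIO:
--         return False
--     if not cadena.startswith('/*'):
--         return False
--     _, sep, resto = cadena[2:].partition('*/')
--     return sep == '*/' and resto == ''
-- ===== Notes on version B (the rewrite author's own statement) =====
-- stated objective: simpler
-- what changed: Replaced the explicit five-state DFA loop with three string operations: an alphabet subset check, startswith('/*'), and a partition('*/') on cadena[2:] requiring an empty remainder (first close must end the string).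
import Mathlib
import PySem

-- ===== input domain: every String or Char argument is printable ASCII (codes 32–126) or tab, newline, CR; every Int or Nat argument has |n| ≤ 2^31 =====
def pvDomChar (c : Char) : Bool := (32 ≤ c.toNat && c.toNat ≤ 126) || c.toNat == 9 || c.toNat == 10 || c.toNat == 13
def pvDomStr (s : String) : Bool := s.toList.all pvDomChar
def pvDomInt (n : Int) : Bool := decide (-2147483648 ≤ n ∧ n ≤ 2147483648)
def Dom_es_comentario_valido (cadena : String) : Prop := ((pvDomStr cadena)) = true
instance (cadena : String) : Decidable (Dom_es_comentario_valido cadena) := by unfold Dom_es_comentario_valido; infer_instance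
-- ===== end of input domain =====

-- B replaces A's explicit five-state DFA loop by string operations (alphabet subset
-- check, startswith('/*'), partition('*/') of cadena[2:] with empty remainder): simpler.


-- ===== PORT A =====
-- the DFA loop of A: one step per symbol, estado as in the Python (0..4)
def aLoop : List Char → Int → Bool
  | [], estado => estado == 4
  | simbolo :: rest, estado =>
    if !(simbolo == '/' || simbolo == '*' || simbolo == 'a' || simbolo == 'b') then false
    else if estado == 0 then
      if simbolo == '/' then aLoop rest 1 else false
    else if estado == 1 then
      if simbolo == '*' then aLoop rest 2 else false
    else if estado == 2 then
      if simbolo == '*' then aLoop rest 3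
      else if simbolo == 'a' || simbolo == 'b' || simbolo == '/' then aLoop rest 2
      else false
    else if estado == 3 then
      if simbolo == '/' then aLoop rest 4
      else if simbolo == '*' then aLoop rest 3
      else if simbolo == 'a' || simbolo == 'b' || simbolo == '/' then aLoop rest 2
      else false
    else if estado == 4 then false
    else aLoop rest estado  -- Python: no branch fires, loop continues with the same estado

def es_comentario_valido (cadena : String) : Bool :=
  if cadena.toList.isEmpty then false   -- 'if not cadena: return False'
  else aLoop cadena.toList 0

-- ===== PORT B =====
-- hand port of cadena2.partition('*/') restricted to what B uses: 'some resto' iff the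
-- separator occurs (sep == '*/'), with resto the part after the FIRST occurrence; exact
-- because str.partition splits at the first occurrence of the separator.
def partStar : List Char → Option (List Char)
  | '*' :: '/' :: rest => some rest
  | _ :: rest => partStar rest
  | [] => none

def es_comentario_valido_alt (cadena : String) : Bool :=
  if !(PySem.Set.issubset (PySem.Set.ofList cadena.toList) ['/', '*', 'a', 'b']) then false
  else if !(PySem.Str.startswith cadena "/*") then false
  else match partStar (cadena.toList.drop 2) with   -- cadena[2:].partition('*/')
    | some resto => resto.isEmpty                    -- sep == '*/' and resto == ''
    | none => false

-- ===== PRECONDITION & SPEC =====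
def Spec_es_comentario_valido (cadena : String) (out : Bool) : Prop := out = es_comentario_valido_alt cadena
instance (cadena : String) (out : Bool) : Decidable (Spec_es_comentario_valido cadena out) := by unfold Spec_es_comentario_valido; infer_instance

-- ===== CLAIM (what is proved, stated in full; the proofs are below) =====
def Claim_equal_es_comentario_valido : Prop := ∀ (cadena : String), Dom_es_comentario_valido cadena → Spec_es_comentario_valido cadena (es_comentario_valido cadena)

-- ===== LEMMAS AND PROOFS =====

def alphaOK (c : Char) : Bool := c == '/' || c == '*' || c == 'a' || c == 'b'

theorem all_cons_split {c : Char} {r : List Char} (h : (c :: r).all alphaOK = true) :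
    alphaOK c = true ∧ r.all alphaOK = true := by
  rw [List.all_cons, Bool.and_eq_true] at h; exact h

-- A rejects as soon as a symbol outside the alphabet appears, from any state
theorem aLoop_bad (l : List Char) (h : ¬ l.all alphaOK = true) : ∀ estado : Int, aLoop l estado = false := by
  induction l with
  | nil => simp at h
  | cons c r ih =>
    intro estado
    by_cases hc : alphaOK c = true
    · have hr : ¬ r.all alphaOK = true := by
        intro hr; exact h (by rw [List.all_cons, Bool.and_eq_true]; exact ⟨hc, hr⟩)
      simp only [aLoop]
      rw [show (c == '/' || c == '*' || c == 'a' || c == 'b') = true from hc]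
      simp only [Bool.not_true, Bool.false_eq_true, if_false]
      split_ifs <;> first | rfl | exact ih hr _
    · simp only [aLoop]
      rw [show (c == '/' || c == '*' || c == 'a' || c == 'b') = false from
        Bool.eq_false_iff.mpr hc]
      simp

theorem aLoop_four (l : List Char) : aLoop l 4 = l.isEmpty := by
  cases l with
  | nil => simp [aLoop]
  | cons c r => simp only [aLoop, List.isEmpty_cons]; split_ifs <;> simp_all

-- value of B's tail test
def gClose (l : List Char) : Bool :=
  match partStar l with
  | some resto => resto.isEmpty
  | none => false

-- the heart: from state 2 the DFA accepts iff the FIRST '*/' in the remainder ends it;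
-- state 3 behaves like state 2 with a pending '*'
theorem aLoop_two_three (l : List Char) (h : l.all alphaOK = true) :
    aLoop l 2 = gClose l ∧ aLoop l 3 = gClose ('*' :: l) := by
  induction l with
  | nil => simp [aLoop, gClose, partStar]
  | cons c r ih =>
    obtain ⟨hc, hr⟩ := all_cons_split h
    obtain ⟨ih2, ih3⟩ := ih hr
    have hc' : c = '/' ∨ c = '*' ∨ c = 'a' ∨ c = 'b' := by
      simp only [alphaOK, Bool.or_eq_true, beq_iff_eq] at hc
      rcases hc with ((h1 | h1) | h1) | h1
      · exact Or.inl h1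
      · exact Or.inr (Or.inl h1)
      · exact Or.inr (Or.inr (Or.inl h1))
      · exact Or.inr (Or.inr (Or.inr h1))
    rcases hc' with h1 | h1 | h1 | h1 <;> subst h1
    · -- c = '/'
      constructor
      · simp only [aLoop]; norm_num
        rw [ih2]; simp [gClose, partStar]
      · simp only [aLoop]; norm_num
        rw [aLoop_four]; simp [gClose, partStar]
    · -- c = '*'
      constructor
      · simp only [aLoop]; norm_num; exact ih3
      · simp only [aLoop]; norm_num
        rw [ih3]; simp [gClose, partStar]
    · -- c = 'a'
      constructor
      · simp only [aLoop]; norm_num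
        rw [ih2]; simp [gClose, partStar]
      · simp only [aLoop]; norm_num
        rw [ih2]; simp [gClose, partStar]
    · -- c = 'b'
      constructor
      · simp only [aLoop]; norm_num
        rw [ih2]; simp [gClose, partStar]
      · simp only [aLoop]; norm_num
        rw [ih2]; simp [gClose, partStar]

theorem issubset_alpha (l : List Char) :
    PySem.Set.issubset (PySem.Set.ofList l) ['/', '*', 'a', 'b'] = l.all alphaOK := by
  by_cases h : l.all alphaOK = true
  · rw [h]
    rw [PySem.Set.issubset_iff]
    intro x hx
    rw [PySem.Set.mem_ofList] at hx
    have := (List.all_eq_true.mp h) x hx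
    simp only [alphaOK, Bool.or_eq_true, beq_iff_eq] at this
    simp only [List.mem_cons]; tauto
  · rw [Bool.eq_false_iff.mpr h, Bool.eq_false_iff]
    intro hs
    apply h
    rw [PySem.Set.issubset_iff] at hs
    rw [List.all_eq_true]
    intro x hx
    have := hs x (by rw [PySem.Set.mem_ofList]; exact hx)
    simp only [List.mem_cons] at this
    simp only [alphaOK, Bool.or_eq_true, beq_iff_eq]; tauto

theorem slash_star_toList : "/*".toList = ['/', '*'] := by decide

theorem startswith_false_of_shape (l : List Char) (h : ∀ r, l ≠ '/' :: '*' :: r) :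
    PySem.Chars.startswith l ("/*".toList) = false := by
  rw [Bool.eq_false_iff]
  intro hs
  rw [PySem.Chars.startswith_iff, slash_star_toList] at hs
  obtain ⟨r, hr⟩ := hs
  exact h r hr.symm

-- the whole equivalence, stated on the String argument
theorem main_eq (cadena : String) :
    es_comentario_valido cadena = es_comentario_valido_alt cadena := by
  unfold es_comentario_valido es_comentario_valido_alt
  rw [issubset_alpha, PySem.Str.startswith_eq]
  by_cases hall : cadena.toList.all alphaOK = true
  · rw [hall]
    simp only [Bool.not_true, Bool.false_eq_true, if_false]
    generalize hl : cadena.toList = l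
    rw [hl] at hall
    cases l with
    | nil => simp [PySem.Chars.startswith]
    | cons c r =>
      by_cases hc : c = '/'
      · subst hc
        cases r with
        | nil =>
          rw [startswith_false_of_shape _ (by intro r' h; injection h with _ h2; exact absurd h2 (by simp))]
          simp [aLoop]
        | cons d r' =>
          by_cases hd : d = '*'
          · subst hd
            have hr : r'.all alphaOK = true := (all_cons_split (all_cons_split hall).2).2
            rw [show PySem.Chars.startswith ('/' :: '*' :: r') ("/*".toList) = true by
              rw [PySem.Chars.startswith_iff, slash_star_toList]; exact ⟨r', rfl⟩]
            simp only [List.isEmpty_cons, Bool.false_eq_true, if_false, Bool.not_true]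
            have h2 := (aLoop_two_three r' hr).1
            have h0 : aLoop ('/' :: '*' :: r') 0 = aLoop r' 2 := by simp [aLoop]
            rw [h0, h2]
            simp [gClose, List.drop]
          · rw [startswith_false_of_shape _ (by
              intro r'' h; injection h with _ h2; injection h2 with h3 _; exact hd h3)]
            simp [aLoop, hd]
      · rw [startswith_false_of_shape _ (by
          intro r' h; injection h with h1 _; exact hc h1)]
        simp [aLoop, hc]
  · rw [Bool.eq_false_iff.mpr hall]
    simp only [Bool.not_false, if_true]
    have hne : cadena.toList ≠ [] := by
      intro h; rw [h] at hall; simp at hall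
    rw [show cadena.toList.isEmpty = false by
      cases hE : cadena.toList with
      | nil => exact absurd hE hne
      | cons a b => simp]
    simp only [Bool.false_eq_true, if_false]
    exact aLoop_bad _ hall 0

-- ===== VERDICT (by name: the statement is the Claim_ definition above) =====
theorem es_comentario_valido_spec : Claim_equal_es_comentario_valido := by
  intro cadena _
  unfold Spec_es_comentario_valido
  exact main_eq cadena
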